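-- pv_equiv track=rewrite | github.com/karthiknrao/scarface | evolve/makenetwork.py | get_output_nodes
-- ===== SOURCE A (Python) =====
-- def get_output_nodes(blist):
--     node_outs = []
--     for i in range(len(blist)):
--         out = 0
--         for node in blist[i:]:
--             out += node[i]
--         node_outs.append(out)
--     return ( [ k for k, val in enumerate(node_outs) if val > 0 ], \
--                  [ k for k, val in enumerate(node_outs) if val == 0 ] + [ len(blist) ] )
-- ===== SOURCE B (Python) =====
-- def get_output_nodes(blist):
--     # Single backward sweep: walk rows from last to first, maintaining running
--     # column sums `acc` for the triangle below; classify each index on the fly.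
--     pos, zero = [], []
--     acc = []
--     for j in range(len(blist) - 1, -1, -1):
--         row = blist[j]
--         acc = [row[i] + acc[i] if i < len(acc) else row[i] for i in range(j + 1)]
--         v = acc[j]
--         if v > 0:
--             pos.append(j)
--         elif v == 0:
--             zero.append(j)
--     pos.reverse()
--     zero.reverse()
--     return (pos, zero + [len(blist)])
-- ===== Notes on version B (the rewrite author's own statement) =====
-- stated objective: alternative
-- what changed: B replaces A's per-column passes (for each i, slice blist[i:] and re-sum column i, then two enumerate comprehensions over node_outs) by one backward sweep over the rows that carries a running column-sum accumulator and classifies each index into the pos/zero result lists on the fly, building them back-to-front; there is no node_outs array, no slicing and no enumerate.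
import Mathlib
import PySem

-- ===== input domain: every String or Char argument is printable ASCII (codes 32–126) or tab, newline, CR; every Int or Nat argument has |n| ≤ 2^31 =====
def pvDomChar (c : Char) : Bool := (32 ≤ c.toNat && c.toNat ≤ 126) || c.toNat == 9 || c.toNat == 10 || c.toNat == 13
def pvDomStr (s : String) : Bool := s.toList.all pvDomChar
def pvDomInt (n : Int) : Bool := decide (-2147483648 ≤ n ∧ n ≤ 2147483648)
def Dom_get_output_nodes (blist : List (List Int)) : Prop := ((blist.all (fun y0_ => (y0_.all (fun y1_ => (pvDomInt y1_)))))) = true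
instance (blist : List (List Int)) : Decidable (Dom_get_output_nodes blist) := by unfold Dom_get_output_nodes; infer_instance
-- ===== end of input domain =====

-- B replaces A's per-column suffix scans and enumerate comprehensions by one
-- backward sweep with a running column-sum accumulator that classifies each
-- index on the fly (objective: alternative, same asymptotic cost).

-- ===== PORT A =====
-- node_outs of A: for i in range(len(blist)): out = 0; for node in blist[i:]: out += node[i]; append
def nodeOutsA (blist : List (List Int)) : List Int :=
  (List.range blist.length).foldl (fun outs (i : Nat) =>
      outs ++ [ (PySem.List.slice blist (some (i : Int)) none).foldl
                  (fun out node => out + PySem.List.pyGetD node (i : Int) 0) 0 ]) []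

def get_output_nodes (blist : List (List Int)) : List Int × List Int :=
  let node_outs := nodeOutsA blist
  ( ((PySem.List.enumerate node_outs 0).filter (fun p => decide (0 < p.2))).map (fun p => p.1),
    ((PySem.List.enumerate node_outs 0).filter (fun p => decide (p.2 = 0))).map (fun p => p.1)
      ++ [(blist.length : Int)] )

-- ===== PORT B =====
-- Python: for j in range(len(blist)-1, -1, -1): row = blist[j];
--   acc = [row[i] + acc[i] if i < len(acc) else row[i] for i in range(j+1)];
--   v = acc[j]; classify into pos/zero (appended, reversed at the end)
def sweepB (blist : List (List Int)) : List Int × List Int × List Int :=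
  (PySem.List.pyRange ((blist.length : Int) - 1) (-1) (-1)).foldl
    (fun st j =>
      let row := PySem.List.pyGetD blist j []
      let acc' := (PySem.List.pyRange 0 (j + 1) 1).map (fun i =>
        if i < (st.2.2.length : Int) then
          PySem.List.pyGetD row i 0 + PySem.List.pyGetD st.2.2 i 0
        else PySem.List.pyGetD row i 0)
      let v := PySem.List.pyGetD acc' j 0
      if 0 < v then (st.1 ++ [j], st.2.1, acc')
      else if v = 0 then (st.1, st.2.1 ++ [j], acc')
      else (st.1, st.2.1, acc'))
    ([], [], [])

def get_output_nodes_alt (blist : List (List Int)) : List Int × List Int :=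
  let st := sweepB blist
  (st.1.reverse, st.2.1.reverse ++ [(blist.length : Int)])

-- ===== PRECONDITION & SPEC =====
-- Pre_ excludes exactly the ragged inputs on which the Python A raises IndexError
-- (some row j shorter than j+1, so blist[j][i] fails for some i ≤ j); B raises there too.
def Pre_get_output_nodes (blist : List (List Int)) : Prop :=
  ∀ j ∈ List.range blist.length, j < (blist.getD j []).length
instance (blist : List (List Int)) : Decidable (Pre_get_output_nodes blist) := by
  unfold Pre_get_output_nodes; infer_instance

def pvWitness_get_output_nodes : List (List Int) := [[1], [0, 2], [1, 0, 3]]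

def Spec_get_output_nodes (blist : List (List Int)) (out : List Int × List Int) : Prop := out = get_output_nodes_alt blist
instance (blist : List (List Int)) (out : List Int × List Int) : Decidable (Spec_get_output_nodes blist out) := by unfold Spec_get_output_nodes; infer_instance

-- ===== CLAIM (what is proved, stated in full; the proofs are below) =====
def Claim_equal_get_output_nodes : Prop := ∀ (blist : List (List Int)), Dom_get_output_nodes blist → Pre_get_output_nodes blist → Spec_get_output_nodes blist (get_output_nodes blist)

-- ===== LEMMAS AND PROOFS =====

-- column sum of column i over the rows from index t on
def pvCsum (blist : List (List Int)) (t i : Nat) : Int :=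
  ((blist.drop t).map (fun row => row.getD i 0)).sum

-- A's node_outs list in closed form
theorem pvColA (blist : List (List Int)) :
    nodeOutsA blist = (List.range blist.length).map (fun i => pvCsum blist i i) := by
  unfold nodeOutsA
  rw [PySem.List.foldl_append_singleton_eq_map, List.nil_append]
  apply List.map_congr_left
  intro i _
  rw [PySem.List.slice_from_natCast, PySem.List.foldl_add, zero_add]
  unfold pvCsum
  congr 1
  exact List.map_congr_left (fun node _ => by rw [PySem.List.pyGetD_natCast])

-- the step of B's backward sweep, named for the proofs (definitionally sweepB's fold body)
def pvStep (blist : List (List Int)) (st : List Int × List Int × List Int) (j : Int) :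
    List Int × List Int × List Int :=
  let row := PySem.List.pyGetD blist j []
  let acc' := (PySem.List.pyRange 0 (j + 1) 1).map (fun i =>
    if i < (st.2.2.length : Int) then
      PySem.List.pyGetD row i 0 + PySem.List.pyGetD st.2.2 i 0
    else PySem.List.pyGetD row i 0)
  let v := PySem.List.pyGetD acc' j 0
  if 0 < v then (st.1 ++ [j], st.2.1, acc')
  else if v = 0 then (st.1, st.2.1 ++ [j], acc')
  else (st.1, st.2.1, acc')

theorem pvSweepB_eq (blist : List (List Int)) :
    sweepB blist = (List.range blist.length).foldl
      (fun st (k : Nat) => pvStep blist st ((blist.length : Int) - 1 - k)) ([], [], []) := by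
  unfold sweepB
  rw [PySem.List.pyRange_neg_one]
  have h : (((blist.length : Int) - 1) - (-1)).toNat = blist.length := by omega
  rw [h, List.foldl_map]
  rfl

-- one intermediate value of the running accumulator, as the fold body reads it
theorem pvAccVal (blist : List (List Int)) (m : Nat)
    (a : List Int)
    (ha : a = if m = 0 then []
          else (List.range (blist.length - m + 1)).map (fun i => pvCsum blist (blist.length - m) i))
    (i : Nat) (hi : i ≤ blist.length - m) :
    (if (i : Int) < (a.length : Int) then a.getD i 0 else 0) = pvCsum blist (blist.length - m) i := by
  by_cases h0 : m = 0
  · subst h0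
    rw [if_pos rfl] at ha
    subst ha
    rw [if_neg (by simp)]
    unfold pvCsum
    simp
  · rw [if_neg h0] at ha
    subst ha
    rw [if_pos (by simp; omega), PySem.List.getD_map_range _ _ _ _ (by omega)]

-- the sweep in closed form after m backward steps
theorem pvSweepInv (blist : List (List Int)) (hP : Pre_get_output_nodes blist)
    (m : Nat) (hm : m ≤ blist.length) :
    (List.range m).foldl
      (fun st (k : Nat) => pvStep blist st ((blist.length : Int) - 1 - k)) ([], [], [])
    = ( ((List.range' (blist.length - m) m).reverse.filter
            (fun i => decide (0 < pvCsum blist i i))).map (fun (i : Nat) => (i : Int)),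
        ((List.range' (blist.length - m) m).reverse.filter
            (fun i => decide (pvCsum blist i i = 0))).map (fun (i : Nat) => (i : Int)),
        if m = 0 then []
        else (List.range (blist.length - m + 1)).map (fun i => pvCsum blist (blist.length - m) i) ) := by
  induction m with
  | zero => simp
  | succ m ih =>
    have hm' : m ≤ blist.length := by omega
    rw [List.range_succ, List.foldl_append, List.foldl_cons, List.foldl_nil, ih hm']
    obtain ⟨n, hn⟩ : ∃ n, n = blist.length := ⟨_, rfl⟩
    rw [← hn]
    obtain ⟨j', hj'⟩ : ∃ j', j' = n - 1 - m := ⟨_, rfl⟩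
    have hmn : m < n := by omega
    have hj : ((n : Int) - 1 - (m : Int)) = ((j' : Nat) : Int) := by omega
    have hj'n : j' < n := by omega
    have hrow : j' < (blist.getD j' []).length := hP j' (List.mem_range.mpr (by omega))
    unfold pvStep
    rw [hj]
    simp only [PySem.List.pyGetD_natCast]
    -- the new accumulator
    have hacc : ((PySem.List.pyRange 0 ((j' : Int) + 1) 1).map (fun i =>
        if i < (((if m = 0 then []
          else (List.range (n - m + 1)).map (fun i => pvCsum blist (n - m) i)) : List Int).length : Int) then
          PySem.List.pyGetD (blist.getD j' []) i 0
            + PySem.List.pyGetD (if m = 0 then []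
                else (List.range (n - m + 1)).map (fun i => pvCsum blist (n - m) i)) i 0
        else PySem.List.pyGetD (blist.getD j' []) i 0))
        = (List.range (j' + 1)).map (fun i => pvCsum blist j' i) := by
      have h1 : ((j' : Int) + 1) = ((j' + 1 : Nat) : Int) := by push_cast; ring
      rw [h1, PySem.List.pyRange_zero_natCast, List.map_map]
      apply List.map_congr_left
      intro i hi
      have hij : i ≤ j' := by
        have := List.mem_range.mp hi; omega
      simp only [Function.comp_apply, PySem.List.pyGetD_natCast]
      have hsplit : ∀ (c : Prop) [Decidable c] (x g : Int),
          (if c then x + g else x) = x + (if c then g else 0) := by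
        intro c _ x g; split_ifs <;> simp
      rw [hsplit]
      rw [pvAccVal blist m _ (by rw [← hn]) i (by omega)]
      have hnm : blist.length - m = j' + 1 := by omega
      rw [hnm, List.getD_eq_getElem blist [] (by omega : j' < blist.length)]
      unfold pvCsum
      rw [List.drop_eq_getElem_cons (by omega : j' < blist.length), List.map_cons, List.sum_cons]
    rw [hacc]
    -- the classified value
    have hv : ((List.range (j' + 1)).map (fun i => pvCsum blist j' i)).getD j' 0
        = pvCsum blist j' j' := PySem.List.getD_map_range _ _ _ _ (by omega)
    simp only [hv]
    -- the descending index list grows by j'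
    have hr : (List.range' (n - (m + 1)) (m + 1)).reverse
        = (List.range' (n - m) m).reverse ++ [j'] := by
      have h2 : n - (m + 1) + 1 = n - m := by omega
      have h3 : n - (m + 1) = j' := by omega
      rw [List.range'_succ, h2, h3, List.reverse_cons]
    have hacc2 : (if m + 1 = 0 then ([] : List Int)
        else (List.range (n - (m + 1) + 1)).map (fun i => pvCsum blist (n - (m + 1)) i))
        = (List.range (j' + 1)).map (fun i => pvCsum blist j' i) := by
      rw [if_neg (by omega)]
      have h3 : n - (m + 1) = j' := by omega
      rw [h3]
    by_cases h1 : 0 < pvCsum blist j' j'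
    · rw [if_pos h1, hr, List.filter_append, List.filter_append, List.map_append, List.map_append]
      have hz : ¬ pvCsum blist j' j' = 0 := by omega
      simp only [List.filter_cons, List.filter_nil, decide_eq_true_eq, if_pos h1, if_neg hz]
      rw [hacc2]
      simp
    · rw [if_neg h1, hr, List.filter_append, List.filter_append, List.map_append, List.map_append]
      by_cases h2 : pvCsum blist j' j' = 0
      · rw [if_pos h2]
        simp only [List.filter_cons, List.filter_nil, decide_eq_true_eq, if_pos h2, if_neg h1]
        rw [hacc2]
        simp
      · rw [if_neg h2]
        simp only [List.filter_cons, List.filter_nil, decide_eq_true_eq, if_neg h2, if_neg h1]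
        rw [hacc2]
        simp

-- B's result in closed form
theorem pvAltEq (blist : List (List Int)) (hP : Pre_get_output_nodes blist) :
    get_output_nodes_alt blist
      = ( ((List.range blist.length).filter (fun i => decide (0 < pvCsum blist i i))).map (fun (i : Nat) => (i : Int)),
          ((List.range blist.length).filter (fun i => decide (pvCsum blist i i = 0))).map (fun (i : Nat) => (i : Int))
            ++ [(blist.length : Int)] ) := by
  unfold get_output_nodes_alt
  rw [pvSweepB_eq, pvSweepInv blist hP blist.length le_rfl]
  have h0 : blist.length - blist.length = 0 := by omega
  rw [h0, ← List.range_eq_range']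
  dsimp only
  rw [← List.map_reverse, ← List.map_reverse, List.filter_reverse, List.filter_reverse,
    List.reverse_reverse, List.reverse_reverse]

-- A's first/second enumerate comprehension in closed form
theorem pvAEqFst (outs : List Int) (q : Int → Bool) :
    ((PySem.List.enumerate outs 0).filter (fun p => q p.2)).map (fun p => p.1)
      = ((List.range outs.length).filter (fun i => q (outs.getD i 0))).map (fun (i : Nat) => (i : Int)) := by
  rw [PySem.List.enumerate_eq_map_pyRange outs 0, List.filter_map, List.map_map]
  have hlen : PySem.List.len outs = ((outs.length : Nat) : Int) := by simp [PySem.List.len]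
  rw [hlen, PySem.List.pyRange_zero_natCast, List.filter_map, List.map_map]
  have hf : List.filter ((((fun p : Int × Int => q p.2)) ∘ fun j => (j, PySem.List.pyGetD outs j 0)) ∘ fun k : Nat => (k : Int)) (List.range outs.length)
      = List.filter (fun i => q (outs.getD i 0)) (List.range outs.length) :=
    List.filter_congr (fun i _ => by simp [PySem.List.pyGetD_natCast])
  rw [hf]
  exact List.map_congr_left (fun i _ => rfl)

-- A's result in the same closed form
theorem pvAEq (blist : List (List Int)) :
    get_output_nodes blist
      = ( ((List.range blist.length).filter (fun i => decide (0 < pvCsum blist i i))).map (fun (i : Nat) => (i : Int)),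
          ((List.range blist.length).filter (fun i => decide (pvCsum blist i i = 0))).map (fun (i : Nat) => (i : Int))
            ++ [(blist.length : Int)] ) := by
  have key : ∀ q : Int → Bool,
      ((PySem.List.enumerate (nodeOutsA blist) 0).filter (fun p => q p.2)).map (fun p => p.1)
        = ((List.range blist.length).filter (fun i => q (pvCsum blist i i))).map (fun (i : Nat) => (i : Int)) := by
    intro q
    rw [pvColA, pvAEqFst]
    simp only [List.length_map, List.length_range]
    congr 1
    apply List.filter_congr
    intro i hi
    rw [PySem.List.getD_map_range _ _ _ _ (List.mem_range.mp hi)]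
  unfold get_output_nodes
  dsimp only
  rw [Prod.mk.injEq]
  exact ⟨key (fun v => decide (0 < v)), congrArg (fun l => l ++ [(blist.length : Int)]) (key (fun v => decide (v = 0)))⟩

-- ===== VERDICT (by name: the statement is the Claim_ definition above) =====
theorem get_output_nodes_spec : Claim_equal_get_output_nodes := by
  intro blist _hdom hpre
  unfold Spec_get_output_nodes
  rw [pvAEq, pvAltEq blist hpre]
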